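-- pv_equiv track=rewrite | github.com/dillonchewwx/Rosalind | Bioinformatics Stronghold/grph.py | adjacency_list
-- ===== SOURCE A (Python) =====
-- def adjacency_list(sequences, k):
--     dictPrefix = {id: prefix(sequence, k) for (id, sequence) in sequences.items()}
--     dictSuffix = {id: suffix(sequence, k) for (id, sequence) in sequences.items()}
--     list = []
--     for id1, suffixseq in dictSuffix.items():
--         for id2, prefixseq in dictPrefix.items():
--             if suffixseq == prefixseq and id1 != id2:
--                 list.append((id1, id2))
--     return list
--
-- def prefix(sequence, k):
--     return sequence[:k]
--
-- def suffix(sequence, k):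
--     return sequence[-k:]
-- ===== SOURCE B (Python) =====
-- def adjacency_list(sequences, k):
--     index = {}
--     for id2, seq in sequences.items():
--         index.setdefault(seq[:k], []).append(id2)
--     result = []
--     for id1, seq in sequences.items():
--         for id2 in index.get(seq[-k:], []):
--             if id1 != id2:
--                 result.append((id1, id2))
--     return result
-- ===== Notes on version B (the rewrite author's own statement) =====
-- stated objective: faster
-- what changed: Replaces A's nested scan over all id pairs with a one-pass dict index from prefix string to list of ids, then one lookup per suffix, preserving order.
import Mathlib
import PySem

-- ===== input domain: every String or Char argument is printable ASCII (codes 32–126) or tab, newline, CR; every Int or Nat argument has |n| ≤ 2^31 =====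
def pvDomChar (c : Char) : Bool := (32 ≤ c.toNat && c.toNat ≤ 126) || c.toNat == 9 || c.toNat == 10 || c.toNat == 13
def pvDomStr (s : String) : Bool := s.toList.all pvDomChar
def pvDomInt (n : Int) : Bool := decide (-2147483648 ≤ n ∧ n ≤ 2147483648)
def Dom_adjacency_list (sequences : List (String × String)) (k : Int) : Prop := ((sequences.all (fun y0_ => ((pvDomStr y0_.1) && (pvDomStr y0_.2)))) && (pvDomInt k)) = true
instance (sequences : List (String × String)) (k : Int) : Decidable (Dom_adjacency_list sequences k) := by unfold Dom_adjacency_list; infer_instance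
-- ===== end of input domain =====

-- B replaces A's nested all-pairs scan with a one-pass dict index from prefix to ids plus one lookup per suffix (faster, asymptotic).


-- ===== PORT A =====
def pyPrefix (sequence : String) (k : Int) : String :=
  PySem.Str.slice sequence none (some k)          -- sequence[:k]

def pySuffix (sequence : String) (k : Int) : String :=
  PySem.Str.slice sequence (some (-k)) none       -- sequence[-k:]

def adjacency_list (sequences : List (String × String)) (k : Int) : List (String × String) :=
  let dictPrefix := sequences.map (fun p => (p.1, pyPrefix p.2 k))
  let dictSuffix := sequences.map (fun p => (p.1, pySuffix p.2 k))
  dictSuffix.foldl (fun acc q =>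
    dictPrefix.foldl (fun acc2 r =>
      if q.2 = r.2 ∧ q.1 ≠ r.1 then acc2 ++ [(q.1, r.1)] else acc2) acc) []

-- ===== PORT B =====
def adjacency_list_alt (sequences : List (String × String)) (k : Int) : List (String × String) :=
  -- index.setdefault(seq[:k], []).append(id2)
  let index : PySem.Dict String (List String) :=
    sequences.foldl (fun d p => d.modify (PySem.Str.slice p.2 none (some k)) [] (· ++ [p.1])) PySem.Dict.empty
  sequences.foldl (fun acc p =>
    (index.getD (PySem.Str.slice p.2 (some (-k)) none) []).foldl (fun a id2 =>
      if p.1 ≠ id2 then a ++ [(p.1, id2)] else a) acc) []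

-- ===== PRECONDITION & SPEC =====
def Spec_adjacency_list (sequences : List (String × String)) (k : Int) (out : List (String × String)) : Prop := out = adjacency_list_alt sequences k
instance (sequences : List (String × String)) (k : Int) (out : List (String × String)) : Decidable (Spec_adjacency_list sequences k out) := by unfold Spec_adjacency_list; infer_instance

-- ===== CLAIM (what is proved, stated in full; the proofs are below) =====
def Claim_equal_adjacency_list : Prop := ∀ (sequences : List (String × String)) (k : Int), Dom_adjacency_list sequences k → Spec_adjacency_list sequences k (adjacency_list sequences k)

-- ===== LEMMAS AND PROOFS =====

-- B's prefix index looked up at key s yields exactly the ids whose prefix is s, in order.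
theorem index_getD (sequences : List (String × String)) (k : Int) (s : String) :
    (sequences.foldl (fun d p => d.modify (pyPrefix p.2 k) [] (· ++ [p.1])) PySem.Dict.empty).getD s []
      = ((sequences.filter (fun q => pyPrefix q.2 k == s)).map (·.1)) := by
  have h := PySem.Dict.getD_foldl_modify_append
      (l := sequences.map (fun p => (pyPrefix p.2 k, p.1)))
      (d := (PySem.Dict.empty : PySem.Dict String (List String))) (c := s)
  simp only [List.foldl_map, List.filter_map, List.map_map, PySem.Dict.getD_empty,
    List.nil_append] at h
  exact h

-- Inner loop of A at one fixed (id1, suffix) equals inner loop of B there.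
theorem inner_eq (sequences : List (String × String)) (k : Int) (id1 s : String)
    (acc : List (String × String)) :
    (sequences.map (fun p => (p.1, pyPrefix p.2 k))).foldl (fun acc2 r =>
        if s = r.2 ∧ id1 ≠ r.1 then acc2 ++ [(id1, r.1)] else acc2) acc
      = ((sequences.filter (fun q => pyPrefix q.2 k == s)).map (·.1)).foldl (fun a id2 =>
          if id1 ≠ id2 then a ++ [(id1, id2)] else a) acc := by
  rw [List.foldl_map]
  dsimp only
  rw [PySem.List.foldl_append_ite (l := sequences)
        (p := fun p => s = pyPrefix p.2 k ∧ id1 ≠ p.1) (f := fun p => (id1, p.1)) (acc := acc),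
      PySem.List.foldl_append_ite (l := (sequences.filter (fun q => pyPrefix q.2 k == s)).map (·.1))
        (p := fun id2 => id1 ≠ id2) (f := fun id2 => (id1, id2)) (acc := acc)]
  congr 1
  rw [List.filter_map, List.map_map, List.filter_filter]
  congr 1
  apply List.filter_congr
  intro q _
  by_cases h1 : pyPrefix q.2 k = s <;> by_cases h2 : id1 = q.1 <;>
    simp [h1, h2, Function.comp, Ne, eq_comm, beq_eq_decide] <;>
    exact fun h => h1 h.symm

theorem adjacency_list_eq_alt (sequences : List (String × String)) (k : Int) :
    adjacency_list sequences k = adjacency_list_alt sequences k := by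
  unfold adjacency_list adjacency_list_alt
  rw [List.foldl_map]
  apply PySem.List.foldl_congr_mem
  intro acc p _
  rw [show (fun (d : PySem.Dict String (List String)) (q : String × String) =>
        d.modify (PySem.Str.slice q.2 none (some k)) [] (· ++ [q.1]))
      = (fun d q => d.modify (pyPrefix q.2 k) [] (· ++ [q.1])) from rfl,
    show PySem.Str.slice p.2 (some (-k)) none = pySuffix p.2 k from rfl,
    index_getD]
  exact inner_eq sequences k p.1 (pySuffix p.2 k) acc

-- ===== VERDICT (by name: the statement is the Claim_ definition above) =====
theorem adjacency_list_spec : Claim_equal_adjacency_list := by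
  intro sequences k _
  exact adjacency_list_eq_alt sequences k
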